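-- pv_equiv track=rewrite | github.com/dannymcc/bluehood | bluehood/patterns.py | _get_period_for_hour
-- ===== SOURCE A (Python) =====
-- TIME_PERIODS = {
--     "early_morning": (5, 8),    # 5AM - 8AM
--     "morning": (8, 12),          # 8AM - 12PM
--     "afternoon": (12, 17),       # 12PM - 5PM
--     "evening": (17, 21),         # 5PM - 9PM
--     "night": (21, 24),           # 9PM - 12AM
--     "late_night": (0, 5),        # 12AM - 5AM
-- }
--
-- def _get_period_for_hour(hour: int) -> str:
--     """Get the time period name for a given hour."""
--     for period, (start, end) in TIME_PERIODS.items():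
--         if period == "late_night":
--             if 0 <= hour < 5:
--                 return period
--         elif start <= hour < end:
--             return period
--     return "unknown"
-- ===== SOURCE B (Python) =====
-- import bisect
--
-- _BOUNDARIES = [5, 8, 12, 17, 21, 24]
-- _NAMES = ["late_night", "early_morning", "morning", "afternoon", "evening", "night"]
--
-- def _get_period_for_hour(hour: int) -> str:
--     """Get the time period name for a given hour."""
--     if hour < 0:
--         return "unknown"
--     idx = bisect.bisect_right(_BOUNDARIES, hour)
--     return _NAMES[idx] if idx < len(_NAMES) else "unknown"
-- ===== Notes on version B (the rewrite author's own statement) =====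
-- stated objective: idiomatic
-- what changed: Replaces the linear scan over six (start, end) ranges with a bisect_right binary search over a sorted boundary list paired with a parallel name list.
import Mathlib
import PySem

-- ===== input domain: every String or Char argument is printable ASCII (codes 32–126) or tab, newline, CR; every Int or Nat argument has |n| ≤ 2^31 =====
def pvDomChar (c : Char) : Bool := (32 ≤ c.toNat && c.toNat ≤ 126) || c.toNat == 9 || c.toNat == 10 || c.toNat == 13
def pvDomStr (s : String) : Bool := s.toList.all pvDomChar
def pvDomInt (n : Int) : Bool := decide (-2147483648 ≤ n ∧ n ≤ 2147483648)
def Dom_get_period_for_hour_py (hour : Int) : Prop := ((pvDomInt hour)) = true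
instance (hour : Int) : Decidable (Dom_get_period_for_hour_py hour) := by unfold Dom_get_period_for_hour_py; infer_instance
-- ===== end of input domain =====

-- B replaces the linear scan over six (start,end) ranges by a bisect_right binary
-- search over a sorted boundary list with a parallel name list (idiomatic; same result).

-- ===== PORT A =====
def timePeriods : List (String × Int × Int) :=
  [("early_morning", (5, 8)), ("morning", (8, 12)), ("afternoon", (12, 17)),
   ("evening", (17, 21)), ("night", (21, 24)), ("late_night", (0, 5))]

def aLoop (hour : Int) : List (String × Int × Int) → String
  | [] => "unknown"
  | (period, s, e) :: rest =>
    if period == "late_night" then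
      if 0 ≤ hour ∧ hour < 5 then period else aLoop hour rest
    else
      if s ≤ hour ∧ hour < e then period else aLoop hour rest

def get_period_for_hour_py (hour : Int) : String := aLoop hour timePeriods

-- ===== PORT B =====
def boundariesB : List Int := [5, 8, 12, 17, 21, 24]
def namesB : List String :=
  ["late_night", "early_morning", "morning", "afternoon", "evening", "night"]

-- library call bisect.bisect_right, ported as the corresponding Lean function:
-- on a sorted list, bisect_right xs x = number of elements ≤ x
def bisectRight (xs : List Int) (x : Int) : Nat := xs.countP (fun b => decide (b ≤ x))

def get_period_for_hour_py_alt (hour : Int) : String :=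
  if hour < 0 then "unknown"
  else
    let idx := bisectRight boundariesB hour
    if idx < namesB.length then namesB.getD idx "unknown" else "unknown"

-- ===== PRECONDITION & SPEC =====
def Spec_get_period_for_hour_py (hour : Int) (out : String) : Prop := out = get_period_for_hour_py_alt hour
instance (hour : Int) (out : String) : Decidable (Spec_get_period_for_hour_py hour out) := by unfold Spec_get_period_for_hour_py; infer_instance

-- ===== CLAIM (what is proved, stated in full; the proofs are below) =====
def Claim_equal_get_period_for_hour_py : Prop := ∀ (hour : Int), Dom_get_period_for_hour_py hour → Spec_get_period_for_hour_py hour (get_period_for_hour_py hour)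

-- ===== LEMMAS AND PROOFS =====

-- ===== VERDICT (by name: the statement is the Claim_ definition above) =====
set_option maxHeartbeats 4000000 in
theorem get_period_for_hour_py_spec : Claim_equal_get_period_for_hour_py := by
  intro hour _
  unfold Spec_get_period_for_hour_py get_period_for_hour_py get_period_for_hour_py_alt
  simp [timePeriods, boundariesB, namesB, bisectRight, aLoop, List.countP_cons]
  split_ifs <;> first | rfl | omega
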